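-- pv_equiv track=rewrite | github.com/DedekindCuts/advent-of-code-2019 | 01/solution.py | trueFuelCost
-- ===== SOURCE A (Python) =====
-- import math
--
-- def fuelCost(mass):
--   """
--   function to calculate fuel cost for a given mass
--   """
--
--   return (math.floor(mass / 3) - 2)
--
-- def trueFuelCost(mass):
--   """
--   function to calculate fuel cost for a given mass after taking mass of fuel
--   into account
--   """
--
--   total = 0
--   cost = mass
--
--   while True:
--     cost = max(fuelCost(cost), 0)
--     total += cost
--     if cost == 0:
--       break
--
--   return total
-- ===== SOURCE B (Python) =====
-- import math
--
-- def fuelCost(mass):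
--   return (math.floor(mass / 3) - 2)
--
-- def trueFuelCost(mass):
--   f = max(fuelCost(mass), 0)
--   if f == 0:
--     return 0
--   return f + trueFuelCost(f)
-- ===== Notes on version B (the rewrite author's own statement) =====
-- stated objective: alternative
-- what changed: Replaced the infinite while-loop with a running total by a direct recursion on the diminishing fuel value (f + trueFuelCost(f)), with no accumulator.
import Mathlib
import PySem

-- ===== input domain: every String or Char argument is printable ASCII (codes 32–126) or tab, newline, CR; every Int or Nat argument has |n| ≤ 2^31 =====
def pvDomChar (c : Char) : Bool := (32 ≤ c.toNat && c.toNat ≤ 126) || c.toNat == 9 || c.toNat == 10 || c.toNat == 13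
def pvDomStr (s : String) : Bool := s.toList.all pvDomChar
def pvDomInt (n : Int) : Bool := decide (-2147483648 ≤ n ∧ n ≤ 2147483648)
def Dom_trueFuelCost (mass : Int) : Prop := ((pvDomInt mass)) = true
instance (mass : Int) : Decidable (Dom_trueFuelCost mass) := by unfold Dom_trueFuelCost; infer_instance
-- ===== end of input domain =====

-- B replaces A's while-loop with an accumulator by a direct recursion on the diminishing
-- fuel value (alternative decomposition, same cost).

-- math.floor(mass / 3) - 2; on |mass| ≤ 2^31 the float division is exact enough that
-- math.floor(mass / 3) = mass // 3, ported as PySem.Int.floordiv.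
def fuelCost (mass : Int) : Int := PySem.Int.floordiv mass 3 - 2

-- termination: the clamped next cost strictly shrinks (in toNat measure) when nonzero
theorem pvFuelLt (c : Int) (h : max (fuelCost c) 0 ≠ 0) :
    (max (fuelCost c) 0).toNat < c.toNat := by
  unfold fuelCost at *
  rw [PySem.Int.floordiv_eq_ediv_of_pos (by omega)] at *
  omega

-- ===== PORT A =====
def trueFuelCostLoop (cost total : Int) : Int :=
  if max (fuelCost cost) 0 = 0 then total + max (fuelCost cost) 0
  else trueFuelCostLoop (max (fuelCost cost) 0) (total + max (fuelCost cost) 0)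
termination_by cost.toNat
decreasing_by exact pvFuelLt cost (by assumption)

def trueFuelCost (mass : Int) : Int := trueFuelCostLoop mass 0

-- ===== PORT B =====
def trueFuelCost_alt (mass : Int) : Int :=
  if max (fuelCost mass) 0 = 0 then 0
  else max (fuelCost mass) 0 + trueFuelCost_alt (max (fuelCost mass) 0)
termination_by mass.toNat
decreasing_by exact pvFuelLt mass (by assumption)

-- ===== PRECONDITION & SPEC =====
def Spec_trueFuelCost (mass : Int) (out : Int) : Prop := out = trueFuelCost_alt mass
instance (mass : Int) (out : Int) : Decidable (Spec_trueFuelCost mass out) := by unfold Spec_trueFuelCost; infer_instance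

-- ===== CLAIM (what is proved, stated in full; the proofs are below) =====
def Claim_equal_trueFuelCost : Prop := ∀ (mass : Int), Dom_trueFuelCost mass → Spec_trueFuelCost mass (trueFuelCost mass)

-- ===== LEMMAS AND PROOFS =====
theorem loop_eq_alt (c t : Int) : trueFuelCostLoop c t = t + trueFuelCost_alt c := by
  rw [trueFuelCostLoop, trueFuelCost_alt]
  by_cases h : max (fuelCost c) 0 = 0
  · simp [h]
  · simp only [h, if_false]
    rw [loop_eq_alt]
    ring
termination_by c.toNat
decreasing_by exact pvFuelLt c h

-- ===== VERDICT (by name: the statement is the Claim_ definition above) =====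
theorem trueFuelCost_spec : Claim_equal_trueFuelCost := by
  intro mass _
  unfold Spec_trueFuelCost trueFuelCost
  rw [loop_eq_alt]
  ring
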